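-- pv_equiv track=rewrite | github.com/DanielHernandez627/TM | Analizador_Lexico.py | tokenizador
-- ===== SOURCE A (Python) =====
-- verbos = ["desea", "gustaria", "ordenar", "repetir", "ver"]
--
-- nucleo = ["tipo", "adicion", "menu", "opciones", "recomendadas", "pedido"]
--
-- adj = ["algo", "mas"]
--
-- det = ["el", "de", "las"]
--
-- pro = ["su", "otro", "le"]
--
-- def tokenizador(word):
--     for i in verbos:
--         if word == i:
--             return "V"
--
--     for x in nucleo:
--         if word == x:
--             return "N"
--
--     for y in adj:
--         if word == y:
--             return "ADV"
--
--     for z in det: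
--         if word == z:
--             return "DET"
--
--     for j in pro:
--         if word == j:
--             return "PRO"
--
--     return ""
-- ===== SOURCE B (Python) =====
-- def tokenizador(word):
--     # decision tree: dispatch on the first character, then one suffix comparison
--     if word == "":
--         return ""
--     c, rest = word[0], word[1:]
--     if c == 'd':
--         if rest == "esea": return "V"
--         if rest == "e": return "DET"
--         return ""
--     if c == 'g':
--         return "V" if rest == "ustaria" else ""
--     if c == 'o':
--         if rest == "rdenar": return "V"
--         if rest == "pciones": return "N"
--         if rest == "tro": return "PRO"
--         return ""
--     if c == 'r':
--         if rest == "epetir": return "V"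
--         if rest == "ecomendadas": return "N"
--         return ""
--     if c == 'v':
--         return "V" if rest == "er" else ""
--     if c == 't':
--         return "N" if rest == "ipo" else ""
--     if c == 'a':
--         if rest == "dicion": return "N"
--         if rest == "lgo": return "ADV"
--         return ""
--     if c == 'm':
--         if rest == "enu": return "N"
--         if rest == "as": return "ADV"
--         return ""
--     if c == 'p':
--         return "N" if rest == "edido" else ""
--     if c == 'e':
--         return "DET" if rest == "l" else ""
--     if c == 'l':
--         if rest == "as": return "DET"
--         if rest == "e": return "PRO"
--         return ""
--     if c == 's':
--         return "PRO" if rest == "u" else ""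
--     return ""
-- ===== Notes on version B (the rewrite author's own statement) =====
-- stated objective: alternative
-- what changed: Replaces A's five sequential linear scans over the tag lists with a hand-built decision tree: dispatch on the word's first character, then at most three suffix comparisons within that branch.
import Mathlib
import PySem

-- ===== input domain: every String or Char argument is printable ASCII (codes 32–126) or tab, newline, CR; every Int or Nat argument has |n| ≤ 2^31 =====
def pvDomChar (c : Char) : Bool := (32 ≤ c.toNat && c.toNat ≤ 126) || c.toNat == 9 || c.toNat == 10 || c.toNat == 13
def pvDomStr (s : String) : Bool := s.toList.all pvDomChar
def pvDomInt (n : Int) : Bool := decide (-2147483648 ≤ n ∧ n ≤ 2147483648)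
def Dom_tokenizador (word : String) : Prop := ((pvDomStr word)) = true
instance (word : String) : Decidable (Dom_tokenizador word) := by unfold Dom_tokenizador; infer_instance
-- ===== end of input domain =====

-- B replaces A's five sequential list scans with a decision tree: dispatch on the first character, then a few suffix comparisons (alternative).

-- ===== PORT A =====
def verbos : List String := ["desea", "gustaria", "ordenar", "repetir", "ver"]
def nucleo : List String := ["tipo", "adicion", "menu", "opciones", "recomendadas", "pedido"]
def adj : List String := ["algo", "mas"]
def det : List String := ["el", "de", "las"]
def pro : List String := ["su", "otro", "le"]

-- 'for i in xs: if word == i: return tag' — some tag on the first match, none if the loop falls through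
def scanTag (word tag : String) : List String → Option String
  | [] => none
  | i :: rest => if word == i then some tag else scanTag word tag rest

def tokenizador (word : String) : String :=
  match scanTag word "V" verbos with
  | some t => t
  | none =>
    match scanTag word "N" nucleo with
    | some t => t
    | none =>
      match scanTag word "ADV" adj with
      | some t => t
      | none =>
        match scanTag word "DET" det with
        | some t => t
        | none =>
          match scanTag word "PRO" pro with
          | some t => t
          | none => ""

-- ===== PORT B =====
-- Source B's decision tree; word[0] / word[1:] of a nonempty string are the head / tail of its
-- character list, so the tree is written over List Char (exact for every string).
def tokTree : List Char → String
  | [] => ""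
  | c :: rest =>
    if c = 'd' then
      if rest = ['e', 's', 'e', 'a'] then "V"
      else if rest = ['e'] then "DET"
      else ""
    else if c = 'g' then
      if rest = ['u', 's', 't', 'a', 'r', 'i', 'a'] then "V"
      else ""
    else if c = 'o' then
      if rest = ['r', 'd', 'e', 'n', 'a', 'r'] then "V"
      else if rest = ['p', 'c', 'i', 'o', 'n', 'e', 's'] then "N"
      else if rest = ['t', 'r', 'o'] then "PRO"
      else ""
    else if c = 'r' then
      if rest = ['e', 'p', 'e', 't', 'i', 'r'] then "V"
      else if rest = ['e', 'c', 'o', 'm', 'e', 'n', 'd', 'a', 'd', 'a', 's'] then "N"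
      else ""
    else if c = 'v' then
      if rest = ['e', 'r'] then "V"
      else ""
    else if c = 't' then
      if rest = ['i', 'p', 'o'] then "N"
      else ""
    else if c = 'a' then
      if rest = ['d', 'i', 'c', 'i', 'o', 'n'] then "N"
      else if rest = ['l', 'g', 'o'] then "ADV"
      else ""
    else if c = 'm' then
      if rest = ['e', 'n', 'u'] then "N"
      else if rest = ['a', 's'] then "ADV"
      else ""
    else if c = 'p' then
      if rest = ['e', 'd', 'i', 'd', 'o'] then "N"
      else ""
    else if c = 'e' then
      if rest = ['l'] then "DET"
      else ""
    else if c = 'l' then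
      if rest = ['a', 's'] then "DET"
      else if rest = ['e'] then "PRO"
      else ""
    else if c = 's' then
      if rest = ['u'] then "PRO"
      else ""
    else ""

def tokenizador_alt (word : String) : String := tokTree word.toList

-- ===== PRECONDITION & SPEC =====
def Spec_tokenizador (word : String) (out : String) : Prop := out = tokenizador_alt word
instance (word : String) (out : String) : Decidable (Spec_tokenizador word out) := by unfold Spec_tokenizador; infer_instance

-- ===== CLAIM =====
def Claim_equal_tokenizador : Prop := ∀ (word : String), Dom_tokenizador word → Spec_tokenizador word (tokenizador word)

-- ===== LEMMAS AND PROOFS =====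
-- A's chain of scans, as one first-match if-chain over the word's character list
def tokScan (l : List Char) : String :=
  if l = ['d', 'e', 's', 'e', 'a'] then "V"
  else if l = ['g', 'u', 's', 't', 'a', 'r', 'i', 'a'] then "V"
  else if l = ['o', 'r', 'd', 'e', 'n', 'a', 'r'] then "V"
  else if l = ['r', 'e', 'p', 'e', 't', 'i', 'r'] then "V"
  else if l = ['v', 'e', 'r'] then "V"
  else if l = ['t', 'i', 'p', 'o'] then "N"
  else if l = ['a', 'd', 'i', 'c', 'i', 'o', 'n'] then "N"
  else if l = ['m', 'e', 'n', 'u'] then "N"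
  else if l = ['o', 'p', 'c', 'i', 'o', 'n', 'e', 's'] then "N"
  else if l = ['r', 'e', 'c', 'o', 'm', 'e', 'n', 'd', 'a', 'd', 'a', 's'] then "N"
  else if l = ['p', 'e', 'd', 'i', 'd', 'o'] then "N"
  else if l = ['a', 'l', 'g', 'o'] then "ADV"
  else if l = ['m', 'a', 's'] then "ADV"
  else if l = ['e', 'l'] then "DET"
  else if l = ['d', 'e'] then "DET"
  else if l = ['l', 'a', 's'] then "DET"
  else if l = ['s', 'u'] then "PRO"
  else if l = ['o', 't', 'r', 'o'] then "PRO"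
  else if l = ['l', 'e'] then "PRO"
  else ""


theorem str_eq_iff_toList (a b : String) : (a = b) ↔ a.toList = b.toList := by
  constructor
  · intro h; rw [h]
  · intro h; exact String.ext (by simpa [String.toList] using h)

theorem tokenizador_eq_tokScan (word : String) :
    tokenizador word = tokScan word.toList := by
  by_cases h0 : word = "desea"
  · subst h0; decide
  by_cases h1 : word = "gustaria"
  · subst h1; decide
  by_cases h2 : word = "ordenar"
  · subst h2; decide
  by_cases h3 : word = "repetir"
  · subst h3; decide
  by_cases h4 : word = "ver"
  · subst h4; decide
  by_cases h5 : word = "tipo"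
  · subst h5; decide
  by_cases h6 : word = "adicion"
  · subst h6; decide
  by_cases h7 : word = "menu"
  · subst h7; decide
  by_cases h8 : word = "opciones"
  · subst h8; decide
  by_cases h9 : word = "recomendadas"
  · subst h9; decide
  by_cases h10 : word = "pedido"
  · subst h10; decide
  by_cases h11 : word = "algo"
  · subst h11; decide
  by_cases h12 : word = "mas"
  · subst h12; decide
  by_cases h13 : word = "el"
  · subst h13; decide
  by_cases h14 : word = "de"
  · subst h14; decide
  by_cases h15 : word = "las"
  · subst h15; decide
  by_cases h16 : word = "su"
  · subst h16; decide
  by_cases h17 : word = "otro"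
  · subst h17; decide
  by_cases h18 : word = "le"
  · subst h18; decide
  have k0 : word.toList ≠ ['d', 'e', 's', 'e', 'a'] := fun hh => h0 ((str_eq_iff_toList word "desea").mpr (hh.trans (by decide)))
  have k1 : word.toList ≠ ['g', 'u', 's', 't', 'a', 'r', 'i', 'a'] := fun hh => h1 ((str_eq_iff_toList word "gustaria").mpr (hh.trans (by decide)))
  have k2 : word.toList ≠ ['o', 'r', 'd', 'e', 'n', 'a', 'r'] := fun hh => h2 ((str_eq_iff_toList word "ordenar").mpr (hh.trans (by decide)))
  have k3 : word.toList ≠ ['r', 'e', 'p', 'e', 't', 'i', 'r'] := fun hh => h3 ((str_eq_iff_toList word "repetir").mpr (hh.trans (by decide)))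
  have k4 : word.toList ≠ ['v', 'e', 'r'] := fun hh => h4 ((str_eq_iff_toList word "ver").mpr (hh.trans (by decide)))
  have k5 : word.toList ≠ ['t', 'i', 'p', 'o'] := fun hh => h5 ((str_eq_iff_toList word "tipo").mpr (hh.trans (by decide)))
  have k6 : word.toList ≠ ['a', 'd', 'i', 'c', 'i', 'o', 'n'] := fun hh => h6 ((str_eq_iff_toList word "adicion").mpr (hh.trans (by decide)))
  have k7 : word.toList ≠ ['m', 'e', 'n', 'u'] := fun hh => h7 ((str_eq_iff_toList word "menu").mpr (hh.trans (by decide)))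
  have k8 : word.toList ≠ ['o', 'p', 'c', 'i', 'o', 'n', 'e', 's'] := fun hh => h8 ((str_eq_iff_toList word "opciones").mpr (hh.trans (by decide)))
  have k9 : word.toList ≠ ['r', 'e', 'c', 'o', 'm', 'e', 'n', 'd', 'a', 'd', 'a', 's'] := fun hh => h9 ((str_eq_iff_toList word "recomendadas").mpr (hh.trans (by decide)))
  have k10 : word.toList ≠ ['p', 'e', 'd', 'i', 'd', 'o'] := fun hh => h10 ((str_eq_iff_toList word "pedido").mpr (hh.trans (by decide)))
  have k11 : word.toList ≠ ['a', 'l', 'g', 'o'] := fun hh => h11 ((str_eq_iff_toList word "algo").mpr (hh.trans (by decide)))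
  have k12 : word.toList ≠ ['m', 'a', 's'] := fun hh => h12 ((str_eq_iff_toList word "mas").mpr (hh.trans (by decide)))
  have k13 : word.toList ≠ ['e', 'l'] := fun hh => h13 ((str_eq_iff_toList word "el").mpr (hh.trans (by decide)))
  have k14 : word.toList ≠ ['d', 'e'] := fun hh => h14 ((str_eq_iff_toList word "de").mpr (hh.trans (by decide)))
  have k15 : word.toList ≠ ['l', 'a', 's'] := fun hh => h15 ((str_eq_iff_toList word "las").mpr (hh.trans (by decide)))
  have k16 : word.toList ≠ ['s', 'u'] := fun hh => h16 ((str_eq_iff_toList word "su").mpr (hh.trans (by decide)))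
  have k17 : word.toList ≠ ['o', 't', 'r', 'o'] := fun hh => h17 ((str_eq_iff_toList word "otro").mpr (hh.trans (by decide)))
  have k18 : word.toList ≠ ['l', 'e'] := fun hh => h18 ((str_eq_iff_toList word "le").mpr (hh.trans (by decide)))
  simp only [tokenizador, tokScan, scanTag, verbos, nucleo, adj, det, pro, beq_iff_eq]
  simp [h0, h1, h2, h3, h4, h5, h6, h7, h8, h9, h10, h11, h12, h13, h14, h15, h16, h17, h18, k0, k1, k2, k3, k4, k5, k6, k7, k8, k9, k10, k11, k12, k13, k14, k15, k16, k17, k18]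

set_option maxHeartbeats 1000000 in
theorem tokScan_eq_tokTree (l : List Char) : tokScan l = tokTree l := by
  cases l with
  | nil => rfl
  | cons c rest =>
    by_cases g0 : c :: rest = ['d', 'e', 's', 'e', 'a']
    · simp only [List.cons.injEq] at g0; obtain ⟨rfl, rfl⟩ := g0; rfl
    by_cases g1 : c :: rest = ['g', 'u', 's', 't', 'a', 'r', 'i', 'a']
    · simp only [List.cons.injEq] at g1; obtain ⟨rfl, rfl⟩ := g1; rfl
    by_cases g2 : c :: rest = ['o', 'r', 'd', 'e', 'n', 'a', 'r']
    · simp only [List.cons.injEq] at g2; obtain ⟨rfl, rfl⟩ := g2; rfl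
    by_cases g3 : c :: rest = ['r', 'e', 'p', 'e', 't', 'i', 'r']
    · simp only [List.cons.injEq] at g3; obtain ⟨rfl, rfl⟩ := g3; rfl
    by_cases g4 : c :: rest = ['v', 'e', 'r']
    · simp only [List.cons.injEq] at g4; obtain ⟨rfl, rfl⟩ := g4; rfl
    by_cases g5 : c :: rest = ['t', 'i', 'p', 'o']
    · simp only [List.cons.injEq] at g5; obtain ⟨rfl, rfl⟩ := g5; rfl
    by_cases g6 : c :: rest = ['a', 'd', 'i', 'c', 'i', 'o', 'n']
    · simp only [List.cons.injEq] at g6; obtain ⟨rfl, rfl⟩ := g6; rfl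
    by_cases g7 : c :: rest = ['m', 'e', 'n', 'u']
    · simp only [List.cons.injEq] at g7; obtain ⟨rfl, rfl⟩ := g7; rfl
    by_cases g8 : c :: rest = ['o', 'p', 'c', 'i', 'o', 'n', 'e', 's']
    · simp only [List.cons.injEq] at g8; obtain ⟨rfl, rfl⟩ := g8; rfl
    by_cases g9 : c :: rest = ['r', 'e', 'c', 'o', 'm', 'e', 'n', 'd', 'a', 'd', 'a', 's']
    · simp only [List.cons.injEq] at g9; obtain ⟨rfl, rfl⟩ := g9; rfl
    by_cases g10 : c :: rest = ['p', 'e', 'd', 'i', 'd', 'o']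
    · simp only [List.cons.injEq] at g10; obtain ⟨rfl, rfl⟩ := g10; rfl
    by_cases g11 : c :: rest = ['a', 'l', 'g', 'o']
    · simp only [List.cons.injEq] at g11; obtain ⟨rfl, rfl⟩ := g11; rfl
    by_cases g12 : c :: rest = ['m', 'a', 's']
    · simp only [List.cons.injEq] at g12; obtain ⟨rfl, rfl⟩ := g12; rfl
    by_cases g13 : c :: rest = ['e', 'l']
    · simp only [List.cons.injEq] at g13; obtain ⟨rfl, rfl⟩ := g13; rfl
    by_cases g14 : c :: rest = ['d', 'e']
    · simp only [List.cons.injEq] at g14; obtain ⟨rfl, rfl⟩ := g14; rfl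
    by_cases g15 : c :: rest = ['l', 'a', 's']
    · simp only [List.cons.injEq] at g15; obtain ⟨rfl, rfl⟩ := g15; rfl
    by_cases g16 : c :: rest = ['s', 'u']
    · simp only [List.cons.injEq] at g16; obtain ⟨rfl, rfl⟩ := g16; rfl
    by_cases g17 : c :: rest = ['o', 't', 'r', 'o']
    · simp only [List.cons.injEq] at g17; obtain ⟨rfl, rfl⟩ := g17; rfl
    by_cases g18 : c :: rest = ['l', 'e']
    · simp only [List.cons.injEq] at g18; obtain ⟨rfl, rfl⟩ := g18; rfl
    simp only [tokScan, g0, g1, g2, g3, g4, g5, g6, g7, g8, g9, g10, g11, g12, g13, g14, g15, g16, g17, g18, if_false]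
    by_cases hd : c = 'd'
    · subst hd; simp only [List.cons.injEq, true_and] at g0 g14; simp [tokTree, g0, g14]
    by_cases hg : c = 'g'
    · subst hg; simp only [List.cons.injEq, true_and] at g1; simp [tokTree, g1]
    by_cases ho : c = 'o'
    · subst ho; simp only [List.cons.injEq, true_and] at g2 g8 g17; simp [tokTree, g2, g8, g17]
    by_cases hr : c = 'r'
    · subst hr; simp only [List.cons.injEq, true_and] at g3 g9; simp [tokTree, g3, g9]
    by_cases hv : c = 'v'
    · subst hv; simp only [List.cons.injEq, true_and] at g4; simp [tokTree, g4]
    by_cases ht : c = 't'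
    · subst ht; simp only [List.cons.injEq, true_and] at g5; simp [tokTree, g5]
    by_cases ha : c = 'a'
    · subst ha; simp only [List.cons.injEq, true_and] at g6 g11; simp [tokTree, g6, g11]
    by_cases hm : c = 'm'
    · subst hm; simp only [List.cons.injEq, true_and] at g7 g12; simp [tokTree, g7, g12]
    by_cases hp : c = 'p'
    · subst hp; simp only [List.cons.injEq, true_and] at g10; simp [tokTree, g10]
    by_cases he : c = 'e'
    · subst he; simp only [List.cons.injEq, true_and] at g13; simp [tokTree, g13]
    by_cases hl : c = 'l'
    · subst hl; simp only [List.cons.injEq, true_and] at g15 g18; simp [tokTree, g15, g18]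
    by_cases hs : c = 's'
    · subst hs; simp only [List.cons.injEq, true_and] at g16; simp [tokTree, g16]
    simp [tokTree, hd, hg, ho, hr, hv, ht, ha, hm, hp, he, hl, hs]

-- ===== VERDICT =====
theorem tokenizador_spec : Claim_equal_tokenizador := by
  intro word _
  unfold Spec_tokenizador tokenizador_alt
  rw [tokenizador_eq_tokScan, tokScan_eq_tokTree]
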